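-- pv_equiv track=rewrite | github.com/hd1534/google-foobar | level3/Queue To Do/solution.py | solution
-- ===== SOURCE A (Python) =====
-- def solution(start, length):
--     # Your code here
--
--     a = b = start
--     result = 0
--
--     for i in range(length):
--         a = b + i
--         b = a + length - i - 1
--         if a == b:
--             result ^= a
--         else:
--             result ^= [
--                 [b, 1, b ^ 1, 0],
--                 [a, a ^ b, a-1, (a-1) ^ b]
--             ][a % 2][(b-a) % 4]
--
--     return result
-- ===== SOURCE B (Python) =====
-- def xor_range(a, b):
--     # XOR of all integers in [a, b] (a <= b) by pair cancellation:
--     # each aligned pair (2k, 2k+1) XORs to 1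
--     result = 0
--     if a % 2:
--         result = a
--         a += 1
--     n = b - a + 1
--     if n % 2:
--         result ^= b
--     if (n // 2) % 2:
--         result ^= 1
--     return result
--
--
-- def solution(start, length):
--     # complement view: XOR the whole square block of IDs at once, then cancel
--     # the skipped tail of each row (row i keeps length - i entries, drops the
--     # last i), instead of XORing each kept row range directly
--     if length <= 0:
--         return 0
--     result = xor_range(start, start + length * length - 1)
--     for i in range(1, length):
--         row_end = start + (i + 1) * length - 1
--         result ^= xor_range(row_end - i + 1, row_end)
--     return result
-- ===== Notes on version B (the rewrite author's own statement) =====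
-- stated objective: alternative
-- what changed: Replaces A's direct per-row accumulation (carried a/b state plus a 2x4 parity dispatch table per kept row) with a complement decomposition: XOR the whole length x length block in one shot, then cancel each row's skipped tail, computing each range XOR by pair cancellation ((2k)^(2k+1)=1) instead of A's table.
import Mathlib
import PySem

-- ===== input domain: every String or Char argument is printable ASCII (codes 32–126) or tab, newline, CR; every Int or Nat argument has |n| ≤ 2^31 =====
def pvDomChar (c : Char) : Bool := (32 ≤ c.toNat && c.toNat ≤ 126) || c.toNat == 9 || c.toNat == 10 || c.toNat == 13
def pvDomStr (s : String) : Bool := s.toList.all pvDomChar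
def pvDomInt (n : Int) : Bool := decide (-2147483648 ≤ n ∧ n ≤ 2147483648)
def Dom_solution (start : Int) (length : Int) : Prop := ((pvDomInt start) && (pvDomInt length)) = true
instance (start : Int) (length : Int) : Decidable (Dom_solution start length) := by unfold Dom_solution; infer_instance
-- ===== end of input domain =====

-- B replaces A's direct per-row accumulation (carried a/b state plus a 2x4 parity dispatch
-- table) with a complement decomposition: XOR the whole square block at once, then cancel each
-- row's skipped tail, each range XOR computed by pair cancellation (objective: alternative).

-- ===== PORT A =====
-- A's nested-list dispatch [[...],[...]][a % 2][(b - a) % 4]; both indices are mod results,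
-- provably in range, so the Option default 0 / [] of the IndexError case is unreachable.
def tableVal (a b : Int) : Int :=
  ((PySem.List.pyGet?
      [[b, 1, PySem.Int.bxor b 1, 0],
       [a, PySem.Int.bxor a b, a - 1, PySem.Int.bxor (a - 1) b]]
      (PySem.Int.mod a 2)).getD []
   |> fun row => (PySem.List.pyGet? row (PySem.Int.mod (b - a) 4)).getD 0)

-- one iteration of A's loop, state (a, b, result)
def stepA (length : Int) (st : Int × Int × Int) (i : Int) : Int × Int × Int :=
  let a := st.2.1 + i
  let b := a + length - i - 1
  (a, b, if a = b then PySem.Int.bxor st.2.2 a else PySem.Int.bxor st.2.2 (tableVal a b))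

def solution (start : Int) (length : Int) : Int :=
  ((PySem.List.pyRange 0 length 1).foldl (stepA length) (start, start, 0)).2.2

-- ===== PORT B =====
-- xor_range(a, b): XOR of [a, b] by pair cancellation; res/a reassignments become the two ifs
def xorRange (a b : Int) : Int :=
  let res0 : Int := if PySem.Int.mod a 2 = 1 then a else 0
  let a2 : Int := if PySem.Int.mod a 2 = 1 then a + 1 else a
  let n : Int := b - a2 + 1
  let res1 : Int := if PySem.Int.mod n 2 = 1 then PySem.Int.bxor res0 b else res0
  if PySem.Int.mod (PySem.Int.floordiv n 2) 2 = 1 then PySem.Int.bxor res1 1 else res1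

-- one iteration of B's loop: cancel row i's skipped tail
def stepB (start length : Int) (r : Int) (i : Int) : Int :=
  let rowEnd := start + (i + 1) * length - 1
  PySem.Int.bxor r (xorRange (rowEnd - i + 1) rowEnd)

def solution_alt (start : Int) (length : Int) : Int :=
  if length ≤ 0 then 0
  else
    (PySem.List.pyRange 1 length 1).foldl (stepB start length)
      (xorRange start (start + length * length - 1))

-- ===== PRECONDITION & SPEC =====
def Spec_solution (start : Int) (length : Int) (out : Int) : Prop := out = solution_alt start length
instance (start : Int) (length : Int) (out : Int) : Decidable (Spec_solution start length out) := by unfold Spec_solution; infer_instance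

-- ===== CLAIM (what is proved, stated in full; the proofs are below) =====
def Claim_equal_solution : Prop := ∀ (start : Int) (length : Int), Dom_solution start length → Spec_solution start length (solution start length)

-- ===== LEMMAS AND PROOFS =====

-- proof-only helper: prefix XOR of 0..n by residue, and A's per-row value in that form
def xorUpto (n : Int) : Int :=
  (PySem.List.pyGet? [n, 1, n + 1, 0] (PySem.Int.mod n 4)).getD 0

-- proof-only helper: A's per-row effect written with xorUpto (bridge between the two ports)
def rowStepClosed (start length : Int) (r : Int) (i : Int) : Int :=
  let lo := start + i * length
  let hi := lo + length - i - 1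
  PySem.Int.bxor r (PySem.Int.bxor (xorUpto hi) (xorUpto (lo - 1)))

-- bit-level recurrence for Nat xor
lemma natBitXor (a b : Nat) (i j : Bool) :
    (2*a + i.toNat) ^^^ (2*b + j.toNat) = 2*(a ^^^ b) + (i ^^ j).toNat := by
  have h := Nat.bitwise_bit (f := bne) (m := a) (n := b) (a := i) (b := j)
  simp only [Nat.bit] at h
  cases i <;> cases j <;> simp_all [HXor.hXor, XorOp.xor, Nat.xor]

lemma natFe (x y : Nat) (hx : x % 2 = 0) (hy : y % 2 = 0) :
    (x + 1) ^^^ y = (x ^^^ y) + 1 := by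
  obtain ⟨a, rfl⟩ : ∃ a, x = 2*a := ⟨x/2, by omega⟩
  obtain ⟨b, rfl⟩ : ∃ b, y = 2*b := ⟨y/2, by omega⟩
  have h1 := natBitXor a b true false
  have h2 := natBitXor a b false false
  simp at h1 h2; omega

lemma natFo (x y : Nat) (hx : x % 2 = 0) (hy : y % 2 = 1) :
    x ^^^ y = ((x + 1) ^^^ y) + 1 := by
  obtain ⟨a, rfl⟩ : ∃ a, x = 2*a := ⟨x/2, by omega⟩
  obtain ⟨b, rfl⟩ : ∃ b, y = 2*b + 1 := ⟨y/2, by omega⟩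
  have h1 := natBitXor a b true true
  have h2 := natBitXor a b false true
  simp at h1 h2; omega

-- adding 1 to an even argument adds 1 to the xor when the other argument is even …
lemma intFe (x y : Int) (hx : x % 2 = 0) (hy : y % 2 = 0) :
    PySem.Int.bxor (x + 1) y = PySem.Int.bxor x y + 1 := by
  unfold PySem.Int.bxor
  rcases (show 0 ≤ x ∨ x < 0 by omega) with h1 | h1 <;> rcases (show 0 ≤ y ∨ y < 0 by omega) with h2 | h2
  · rw [if_pos (by omega : (0:Int) ≤ x + 1), if_pos h2, if_pos h1, if_pos h2]
    have h := natFe x.toNat y.toNat (by omega) (by omega)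
    rw [show (x+1).toNat = x.toNat + 1 by omega]; omega
  · rw [if_pos (by omega : (0:Int) ≤ x + 1), if_neg (by omega), if_pos h1, if_neg (by omega)]
    have h := natFo x.toNat (-y-1).toNat (by omega) (by omega)
    rw [show (x+1).toNat = x.toNat + 1 by omega]; omega
  · rw [if_neg (by omega), if_pos h2, if_neg (by omega), if_pos h2]
    have h := natFe (-(x+1)-1).toNat y.toNat (by omega) (by omega)
    rw [show (-x-1).toNat = (-(x+1)-1).toNat + 1 by omega]; omega
  · rw [if_neg (by omega), if_neg (by omega), if_neg (by omega), if_neg (by omega)]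
    have h := natFo (-(x+1)-1).toNat (-y-1).toNat (by omega) (by omega)
    rw [show (-x-1).toNat = (-(x+1)-1).toNat + 1 by omega]; omega

-- … and subtracts 1 when the other argument is odd
lemma intFo (x y : Int) (hx : x % 2 = 0) (hy : y % 2 = 1) :
    PySem.Int.bxor (x + 1) y = PySem.Int.bxor x y - 1 := by
  unfold PySem.Int.bxor
  rcases (show 0 ≤ x ∨ x < 0 by omega) with h1 | h1 <;> rcases (show 0 ≤ y ∨ y < 0 by omega) with h2 | h2
  · rw [if_pos (by omega : (0:Int) ≤ x + 1), if_pos h2, if_pos h1, if_pos h2]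
    have h := natFo x.toNat y.toNat (by omega) (by omega)
    rw [show (x+1).toNat = x.toNat + 1 by omega]; omega
  · rw [if_pos (by omega : (0:Int) ≤ x + 1), if_neg (by omega), if_pos h1, if_neg (by omega)]
    have h := natFe x.toNat (-y-1).toNat (by omega) (by omega)
    rw [show (x+1).toNat = x.toNat + 1 by omega]; omega
  · rw [if_neg (by omega), if_pos h2, if_neg (by omega), if_pos h2]
    have h := natFo (-(x+1)-1).toNat y.toNat (by omega) (by omega)
    rw [show (-x-1).toNat = (-(x+1)-1).toNat + 1 by omega]; omega
  · rw [if_neg (by omega), if_neg (by omega), if_neg (by omega), if_neg (by omega)]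
    have h := natFe (-(x+1)-1).toNat (-y-1).toNat (by omega) (by omega)
    rw [show (-x-1).toNat = (-(x+1)-1).toNat + 1 by omega]; omega

lemma intE (x : Int) (hx : x % 2 = 0) : PySem.Int.bxor x 1 = x + 1 := by
  have h := intFe 0 x rfl hx
  rw [zero_add, PySem.Int.bxor_comm 0 x, PySem.Int.bxor_zero] at h
  rw [PySem.Int.bxor_comm]; exact h

lemma intEo (x : Int) (hx : x % 2 = 1) : PySem.Int.bxor x 1 = x - 1 := by
  have h := intFo (x - 1) 1 (by omega) (by decide)
  have hE := intE (x - 1) (by omega)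
  rw [sub_add_cancel, hE] at h
  omega

-- two's-complement encoding: decI x s = x if s is false, -x-1 if s is true
def decI (x : Nat) (s : Bool) : Int := if s then -(x : Int) - 1 else (x : Int)

lemma bxor_decI (x y : Nat) (s t : Bool) :
    PySem.Int.bxor (decI x s) (decI y t) = decI (x ^^^ y) (s ^^ t) := by
  cases s <;> cases t <;> simp only [decI, Bool.xor_false, Bool.xor_true,
    Bool.not_false, Bool.not_true, if_true, if_false, Bool.false_eq_true] <;>
    unfold PySem.Int.bxor
  · rw [if_pos (by omega : (0:Int) ≤ (x:Int)), if_pos (by omega : (0:Int) ≤ (y:Int)),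
        show ((x:Int)).toNat = x from by omega, show ((y:Int)).toNat = y from by omega]
  · rw [if_pos (by omega : (0:Int) ≤ (x:Int)), if_neg (by omega : ¬ (0:Int) ≤ -(y:Int) - 1),
        show ((x:Int)).toNat = x from by omega,
        show (-(-(y:Int) - 1) - 1).toNat = y from by omega]
  · rw [if_neg (by omega : ¬ (0:Int) ≤ -(x:Int) - 1), if_pos (by omega : (0:Int) ≤ (y:Int)),
        show ((y:Int)).toNat = y from by omega,
        show (-(-(x:Int) - 1) - 1).toNat = x from by omega]
  · rw [if_neg (by omega : ¬ (0:Int) ≤ -(x:Int) - 1), if_neg (by omega : ¬ (0:Int) ≤ -(y:Int) - 1),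
        show (-(-(x:Int) - 1) - 1).toNat = x from by omega,
        show (-(-(y:Int) - 1) - 1).toNat = y from by omega]

lemma exists_decI (a : Int) : ∃ x s, a = decI x s := by
  rcases (show 0 ≤ a ∨ a < 0 by omega) with h | h
  · exact ⟨a.toNat, false, by simp [decI]; omega⟩
  · exact ⟨(-a - 1).toNat, true, by simp [decI]; omega⟩

lemma bxor_assoc (a b c : Int) :
    PySem.Int.bxor (PySem.Int.bxor a b) c = PySem.Int.bxor a (PySem.Int.bxor b c) := by
  obtain ⟨x, s, rfl⟩ := exists_decI a
  obtain ⟨y, t, rfl⟩ := exists_decI b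
  obtain ⟨z, u, rfl⟩ := exists_decI c
  rw [bxor_decI, bxor_decI, bxor_decI, bxor_decI, Nat.xor_assoc, Bool.xor_assoc]

lemma natXorParity (x y : Nat) : (x ^^^ y) % 2 = (x + y) % 2 := by
  obtain ⟨a, i, rfl⟩ : ∃ (a : Nat) (i : Bool), x = 2*a + i.toNat :=
    ⟨x / 2, decide (x % 2 = 1), by
      rcases (show x % 2 = 0 ∨ x % 2 = 1 by omega) with h | h <;> (simp [h]; omega)⟩
  obtain ⟨b, j, rfl⟩ : ∃ (b : Nat) (j : Bool), y = 2*b + j.toNat :=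
    ⟨y / 2, decide (y % 2 = 1), by
      rcases (show y % 2 = 0 ∨ y % 2 = 1 by omega) with h | h <;> (simp [h]; omega)⟩
  rw [natBitXor]
  cases i <;> cases j <;> simp <;> omega

lemma bxorParity (x y : Int) : PySem.Int.bxor x y % 2 = (x + y) % 2 := by
  obtain ⟨u, s, rfl⟩ := exists_decI x
  obtain ⟨v, t, rfl⟩ := exists_decI y
  rw [bxor_decI]
  have h := natXorParity u v
  cases s <;> cases t <;> simp only [decI, Bool.xor_false, Bool.xor_true,
    Bool.not_true, Bool.not_false, if_true, if_false, Bool.false_eq_true] <;> omega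

lemma bxor_left_comm (a b c : Int) :
    PySem.Int.bxor a (PySem.Int.bxor b c) = PySem.Int.bxor b (PySem.Int.bxor a c) := by
  rw [← bxor_assoc, PySem.Int.bxor_comm a b, bxor_assoc]

lemma xu0 (n : Int) (h : n % 4 = 0) : xorUpto n = n := by
  unfold xorUpto; rw [show PySem.Int.mod n 4 = 0 from by simp [pysem]; omega]; rfl
lemma xu1 (n : Int) (h : n % 4 = 1) : xorUpto n = 1 := by
  unfold xorUpto; rw [show PySem.Int.mod n 4 = 1 from by simp [pysem]; omega]; rfl
lemma xu2 (n : Int) (h : n % 4 = 2) : xorUpto n = n + 1 := by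
  unfold xorUpto; rw [show PySem.Int.mod n 4 = 2 from by simp [pysem]; omega]; rfl
lemma xu3 (n : Int) (h : n % 4 = 3) : xorUpto n = 0 := by
  unfold xorUpto; rw [show PySem.Int.mod n 4 = 3 from by simp [pysem]; omega]; rfl

-- B's prefix-xor form equals A's table entry, for ALL integers a b (16 residue cases)
lemma gEq (a b : Int) :
    PySem.Int.bxor (xorUpto b) (xorUpto (a - 1)) = tableVal a b := by
  have ha4 : a % 4 = 0 ∨ a % 4 = 1 ∨ a % 4 = 2 ∨ a % 4 = 3 := by omega
  have hr4 : (b - a) % 4 = 0 ∨ (b - a) % 4 = 1 ∨ (b - a) % 4 = 2 ∨ (b - a) % 4 = 3 := by omega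
  rcases ha4 with ha | ha | ha | ha <;> rcases hr4 with hr | hr | hr | hr
  -- a % 4 = 0
  · rw [show tableVal a b = b from by
        unfold tableVal
        rw [show PySem.Int.mod a 2 = 0 from by simp [pysem]; omega,
            show PySem.Int.mod (b - a) 4 = 0 from by simp [pysem]; omega]; rfl,
      xu0 b (by omega), xu3 (a-1) (by omega), PySem.Int.bxor_zero]
  · rw [show tableVal a b = 1 from by
        unfold tableVal
        rw [show PySem.Int.mod a 2 = 0 from by simp [pysem]; omega,
            show PySem.Int.mod (b - a) 4 = 1 from by simp [pysem]; omega]; rfl,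
      xu1 b (by omega), xu3 (a-1) (by omega), PySem.Int.bxor_zero]
  · rw [show tableVal a b = PySem.Int.bxor b 1 from by
        unfold tableVal
        rw [show PySem.Int.mod a 2 = 0 from by simp [pysem]; omega,
            show PySem.Int.mod (b - a) 4 = 2 from by simp [pysem]; omega]; rfl,
      xu2 b (by omega), xu3 (a-1) (by omega), PySem.Int.bxor_zero, intE b (by omega)]
  · rw [show tableVal a b = 0 from by
        unfold tableVal
        rw [show PySem.Int.mod a 2 = 0 from by simp [pysem]; omega,
            show PySem.Int.mod (b - a) 4 = 3 from by simp [pysem]; omega]; rfl,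
      xu3 b (by omega), xu3 (a-1) (by omega), PySem.Int.bxor_zero]
  -- a % 4 = 1
  · rw [show tableVal a b = a from by
        unfold tableVal
        rw [show PySem.Int.mod a 2 = 1 from by simp [pysem]; omega,
            show PySem.Int.mod (b - a) 4 = 0 from by simp [pysem]; omega]; rfl,
      xu1 b (by omega), xu0 (a-1) (by omega), PySem.Int.bxor_comm, intE (a-1) (by omega)]
    omega
  · rw [show tableVal a b = PySem.Int.bxor a b from by
        unfold tableVal
        rw [show PySem.Int.mod a 2 = 1 from by simp [pysem]; omega,
            show PySem.Int.mod (b - a) 4 = 1 from by simp [pysem]; omega]; rfl,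
      xu2 b (by omega), xu0 (a-1) (by omega)]
    have h1 := intFe (a-1) b (by omega) (by omega)
    have h2 := intFe b (a-1) (by omega) (by omega)
    have hc := PySem.Int.bxor_comm (a-1) b
    rw [sub_add_cancel] at h1
    omega
  · rw [show tableVal a b = a - 1 from by
        unfold tableVal
        rw [show PySem.Int.mod a 2 = 1 from by simp [pysem]; omega,
            show PySem.Int.mod (b - a) 4 = 2 from by simp [pysem]; omega]; rfl,
      xu3 b (by omega), xu0 (a-1) (by omega), PySem.Int.bxor_comm, PySem.Int.bxor_zero]
  · rw [show tableVal a b = PySem.Int.bxor (a - 1) b from by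
        unfold tableVal
        rw [show PySem.Int.mod a 2 = 1 from by simp [pysem]; omega,
            show PySem.Int.mod (b - a) 4 = 3 from by simp [pysem]; omega]; rfl,
      xu0 b (by omega), xu0 (a-1) (by omega), PySem.Int.bxor_comm]
  -- a % 4 = 2
  · rw [show tableVal a b = b from by
        unfold tableVal
        rw [show PySem.Int.mod a 2 = 0 from by simp [pysem]; omega,
            show PySem.Int.mod (b - a) 4 = 0 from by simp [pysem]; omega]; rfl,
      xu2 b (by omega), xu1 (a-1) (by omega), intEo (b+1) (by omega)]
    omega
  · rw [show tableVal a b = 1 from by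
        unfold tableVal
        rw [show PySem.Int.mod a 2 = 0 from by simp [pysem]; omega,
            show PySem.Int.mod (b - a) 4 = 1 from by simp [pysem]; omega]; rfl,
      xu3 b (by omega), xu1 (a-1) (by omega), PySem.Int.bxor_comm, PySem.Int.bxor_zero]
  · rw [show tableVal a b = PySem.Int.bxor b 1 from by
        unfold tableVal
        rw [show PySem.Int.mod a 2 = 0 from by simp [pysem]; omega,
            show PySem.Int.mod (b - a) 4 = 2 from by simp [pysem]; omega]; rfl,
      xu0 b (by omega), xu1 (a-1) (by omega)]
  · rw [show tableVal a b = 0 from by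
        unfold tableVal
        rw [show PySem.Int.mod a 2 = 0 from by simp [pysem]; omega,
            show PySem.Int.mod (b - a) 4 = 3 from by simp [pysem]; omega]; rfl,
      xu1 b (by omega), xu1 (a-1) (by omega), PySem.Int.bxor_self]
  -- a % 4 = 3
  · rw [show tableVal a b = a from by
        unfold tableVal
        rw [show PySem.Int.mod a 2 = 1 from by simp [pysem]; omega,
            show PySem.Int.mod (b - a) 4 = 0 from by simp [pysem]; omega]; rfl,
      xu3 b (by omega), xu2 (a-1) (by omega), PySem.Int.bxor_comm, PySem.Int.bxor_zero]
    omega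
  · rw [show tableVal a b = PySem.Int.bxor a b from by
        unfold tableVal
        rw [show PySem.Int.mod a 2 = 1 from by simp [pysem]; omega,
            show PySem.Int.mod (b - a) 4 = 1 from by simp [pysem]; omega]; rfl,
      xu0 b (by omega), xu2 (a-1) (by omega), sub_add_cancel, PySem.Int.bxor_comm]
  · rw [show tableVal a b = a - 1 from by
        unfold tableVal
        rw [show PySem.Int.mod a 2 = 1 from by simp [pysem]; omega,
            show PySem.Int.mod (b - a) 4 = 2 from by simp [pysem]; omega]; rfl,
      xu1 b (by omega), xu2 (a-1) (by omega), sub_add_cancel, PySem.Int.bxor_comm,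
      intEo a (by omega)]
  · rw [show tableVal a b = PySem.Int.bxor (a - 1) b from by
        unfold tableVal
        rw [show PySem.Int.mod a 2 = 1 from by simp [pysem]; omega,
            show PySem.Int.mod (b - a) 4 = 3 from by simp [pysem]; omega]; rfl,
      xu2 b (by omega), xu2 (a-1) (by omega), sub_add_cancel]
    have h1 := intFo b a (by omega) (by omega)
    have h2 := intFe (a-1) b (by omega) (by omega)
    have hc1 := PySem.Int.bxor_comm (b+1) a
    have hc2 := PySem.Int.bxor_comm a b
    rw [sub_add_cancel] at h2
    omega

-- A's diagonal branch agrees with the table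
lemma tableVal_diag (a : Int) : tableVal a a = a := by
  have h := gEq a a
  have ha4 : a % 4 = 0 ∨ a % 4 = 1 ∨ a % 4 = 2 ∨ a % 4 = 3 := by omega
  rcases ha4 with ha | ha | ha | ha
  · rw [xu0 a (by omega), xu3 (a-1) (by omega), PySem.Int.bxor_zero] at h; omega
  · rw [xu1 a (by omega), xu0 (a-1) (by omega), PySem.Int.bxor_comm, intE (a-1) (by omega)] at h; omega
  · rw [xu2 a (by omega), xu1 (a-1) (by omega), intEo (a+1) (by omega)] at h; omega
  · rw [xu3 a (by omega), xu2 (a-1) (by omega), PySem.Int.bxor_comm, PySem.Int.bxor_zero, sub_add_cancel] at h; omega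

-- per-row value of A (both branches) equals the prefix-form row value
lemma rowEq (a b : Int) :
    (if a = b then a else tableVal a b) = PySem.Int.bxor (xorUpto b) (xorUpto (a - 1)) := by
  by_cases hab : a = b
  · subst hab; rw [if_pos rfl, gEq, tableVal_diag]
  · rw [if_neg hab, gEq]

-- A's fold from slot k (with the b-state in closed form) computes the prefix-form fold
lemma loopEq (start length : Int) : ∀ (n : Nat) (k : Int), k + (n : Int) = length →
    ∀ (a0 r : Int),
    ((PySem.List.pyRange k length 1).foldl (stepA length) (a0, start + k * (length - 1), r)).2.2
      = (PySem.List.pyRange k length 1).foldl (rowStepClosed start length) r := by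
  intro n
  induction n with
  | zero =>
      intro k hk a0 r
      rw [PySem.List.pyRange_one_eq_nil (by omega)]; rfl
  | succ m ih =>
      intro k hk a0 r
      have hhead : stepA length (a0, start + k * (length - 1), r) k
          = (start + k * length, start + (k + 1) * (length - 1), rowStepClosed start length r k) := by
        unfold stepA rowStepClosed
        dsimp only
        rw [← apply_ite (PySem.Int.bxor r), rowEq]
        rw [show start + k * (length - 1) + k = start + k * length by ring,
            show start + k * length + length - k - 1 = start + (k + 1) * (length - 1) by ring,
            show start + k * length - 1 = start + k * length - 1 by rfl]
      rw [PySem.List.pyRange_one_cons (by omega), List.foldl_cons, List.foldl_cons, hhead]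
      exact ih (k + 1) (by omega) (start + k * length) (rowStepClosed start length r k)

-- XOR of a list (right fold), and the fold/bigXor bridge
def bigXor (l : List Int) : Int := l.foldr PySem.Int.bxor 0

lemma zero_bxor (a : Int) : PySem.Int.bxor 0 a = a := by
  rw [PySem.Int.bxor_comm, PySem.Int.bxor_zero]

lemma bigXor_cons (x : Int) (l : List Int) : bigXor (x :: l) = PySem.Int.bxor x (bigXor l) := rfl

lemma foldl_bxor_eq (g : Int → Int) (l : List Int) : ∀ r : Int,
    l.foldl (fun acc i => PySem.Int.bxor acc (g i)) r = PySem.Int.bxor r (bigXor (l.map g)) := by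
  induction l with
  | nil => intro r; simp [bigXor]
  | cons x l ih =>
      intro r
      rw [List.map_cons, List.foldl_cons, ih, bigXor_cons, bxor_assoc]

lemma bxor_mix (p q x y : Int) :
    PySem.Int.bxor (PySem.Int.bxor p q) (PySem.Int.bxor x y)
      = PySem.Int.bxor (PySem.Int.bxor p x) (PySem.Int.bxor q y) := by
  rw [bxor_assoc, bxor_left_comm q x, ← bxor_assoc]

lemma bxor_cancel4 (A B C : Int) :
    PySem.Int.bxor (PySem.Int.bxor A B) (PySem.Int.bxor A C) = PySem.Int.bxor B C := by
  rw [bxor_mix, PySem.Int.bxor_self, zero_bxor]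

lemma bxor_cancel4' (A B C : Int) :
    PySem.Int.bxor (PySem.Int.bxor A B) (PySem.Int.bxor C A) = PySem.Int.bxor C B := by
  rw [PySem.Int.bxor_comm C A, bxor_cancel4, PySem.Int.bxor_comm]

lemma acStep (t u e x y : Int) :
    PySem.Int.bxor (PySem.Int.bxor t (PySem.Int.bxor x y)) (PySem.Int.bxor u (PySem.Int.bxor e x))
      = PySem.Int.bxor (PySem.Int.bxor t u) (PySem.Int.bxor e y) := by
  rw [bxor_mix, bxor_cancel4']

lemma finalAC (A B C T : Int) :
    PySem.Int.bxor (PySem.Int.bxor A B) (PySem.Int.bxor T (PySem.Int.bxor C A))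
      = PySem.Int.bxor (PySem.Int.bxor C B) T := by
  rw [bxor_left_comm (PySem.Int.bxor A B) T (PySem.Int.bxor C A), bxor_cancel4',
      PySem.Int.bxor_comm T]

-- B's xor_range in prefix form, for ALL integers a b (16 residue cases)
lemma xorRange_eq (a b : Int) :
    xorRange a b = PySem.Int.bxor (xorUpto b) (xorUpto (a - 1)) := by
  have ha4 : a % 4 = 0 ∨ a % 4 = 1 ∨ a % 4 = 2 ∨ a % 4 = 3 := by omega
  have hr4 : (b - a) % 4 = 0 ∨ (b - a) % 4 = 1 ∨ (b - a) % 4 = 2 ∨ (b - a) % 4 = 3 := by omega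
  rcases ha4 with ha | ha | ha | ha <;> rcases hr4 with hr | hr | hr | hr
  -- a % 4 = 0  (a even, xorUpto (a-1) = 0)
  · have hA : ¬ PySem.Int.mod a 2 = 1 := by simp [pysem]; omega
    have hN : PySem.Int.mod (b - a + 1) 2 = 1 := by simp [pysem]; omega
    have hD : ¬ PySem.Int.mod (PySem.Int.floordiv (b - a + 1) 2) 2 = 1 := by simp [pysem]; omega
    dsimp only [xorRange]
    rw [if_neg hA, if_neg hA, if_pos hN, if_neg hD, xu0 b (by omega), xu3 (a-1) (by omega),
        zero_bxor, PySem.Int.bxor_zero]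
  · have hA : ¬ PySem.Int.mod a 2 = 1 := by simp [pysem]; omega
    have hN : ¬ PySem.Int.mod (b - a + 1) 2 = 1 := by simp [pysem]; omega
    have hD : PySem.Int.mod (PySem.Int.floordiv (b - a + 1) 2) 2 = 1 := by simp [pysem]; omega
    dsimp only [xorRange]
    rw [if_neg hA, if_neg hA, if_neg hN, if_pos hD, xu1 b (by omega), xu3 (a-1) (by omega),
        zero_bxor, PySem.Int.bxor_zero]
  · have hA : ¬ PySem.Int.mod a 2 = 1 := by simp [pysem]; omega
    have hN : PySem.Int.mod (b - a + 1) 2 = 1 := by simp [pysem]; omega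
    have hD : PySem.Int.mod (PySem.Int.floordiv (b - a + 1) 2) 2 = 1 := by simp [pysem]; omega
    dsimp only [xorRange]
    rw [if_neg hA, if_neg hA, if_pos hN, if_pos hD, xu2 b (by omega), xu3 (a-1) (by omega),
        zero_bxor, PySem.Int.bxor_zero, intE b (by omega)]
  · have hA : ¬ PySem.Int.mod a 2 = 1 := by simp [pysem]; omega
    have hN : ¬ PySem.Int.mod (b - a + 1) 2 = 1 := by simp [pysem]; omega
    have hD : ¬ PySem.Int.mod (PySem.Int.floordiv (b - a + 1) 2) 2 = 1 := by simp [pysem]; omega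
    dsimp only [xorRange]
    rw [if_neg hA, if_neg hA, if_neg hN, if_neg hD, xu3 b (by omega), xu3 (a-1) (by omega),
        PySem.Int.bxor_zero]
  -- a % 4 = 1  (a odd, xorUpto (a-1) = a - 1)
  · have hA : PySem.Int.mod a 2 = 1 := by simp [pysem]; omega
    have hN : ¬ PySem.Int.mod (b - (a + 1) + 1) 2 = 1 := by simp [pysem]; omega
    have hD : ¬ PySem.Int.mod (PySem.Int.floordiv (b - (a + 1) + 1) 2) 2 = 1 := by simp [pysem]; omega
    dsimp only [xorRange]
    rw [if_pos hA, if_pos hA, if_neg hN, if_neg hD, xu1 b (by omega), xu0 (a-1) (by omega)]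
    have hE := intE (a-1) (by omega)
    rw [PySem.Int.bxor_comm 1 (a-1), hE]
    omega
  · have hA : PySem.Int.mod a 2 = 1 := by simp [pysem]; omega
    have hN : PySem.Int.mod (b - (a + 1) + 1) 2 = 1 := by simp [pysem]; omega
    have hD : ¬ PySem.Int.mod (PySem.Int.floordiv (b - (a + 1) + 1) 2) 2 = 1 := by simp [pysem]; omega
    dsimp only [xorRange]
    rw [if_pos hA, if_pos hA, if_pos hN, if_neg hD, xu2 b (by omega), xu0 (a-1) (by omega)]
    have h1 := intFe (a-1) b (by omega) (by omega)
    have h2 := intFe b (a-1) (by omega) (by omega)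
    have hc := PySem.Int.bxor_comm (a-1) b
    rw [sub_add_cancel] at h1
    omega
  · have hA : PySem.Int.mod a 2 = 1 := by simp [pysem]; omega
    have hN : ¬ PySem.Int.mod (b - (a + 1) + 1) 2 = 1 := by simp [pysem]; omega
    have hD : PySem.Int.mod (PySem.Int.floordiv (b - (a + 1) + 1) 2) 2 = 1 := by simp [pysem]; omega
    dsimp only [xorRange]
    rw [if_pos hA, if_pos hA, if_neg hN, if_pos hD, xu3 b (by omega), xu0 (a-1) (by omega),
        intEo a (by omega), zero_bxor]
  · have hA : PySem.Int.mod a 2 = 1 := by simp [pysem]; omega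
    have hN : PySem.Int.mod (b - (a + 1) + 1) 2 = 1 := by simp [pysem]; omega
    have hD : PySem.Int.mod (PySem.Int.floordiv (b - (a + 1) + 1) 2) 2 = 1 := by simp [pysem]; omega
    dsimp only [xorRange]
    rw [if_pos hA, if_pos hA, if_pos hN, if_pos hD, xu0 b (by omega), xu0 (a-1) (by omega)]
    have h1 := intFe (a-1) b (by omega) (by omega)
    rw [sub_add_cancel] at h1
    have hp : PySem.Int.bxor a b % 2 = 1 := by
      rw [bxorParity]; omega
    rw [intEo _ hp]
    have hc := PySem.Int.bxor_comm (a-1) b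
    omega
  -- a % 4 = 2  (a even, xorUpto (a-1) = 1)
  · have hA : ¬ PySem.Int.mod a 2 = 1 := by simp [pysem]; omega
    have hN : PySem.Int.mod (b - a + 1) 2 = 1 := by simp [pysem]; omega
    have hD : ¬ PySem.Int.mod (PySem.Int.floordiv (b - a + 1) 2) 2 = 1 := by simp [pysem]; omega
    dsimp only [xorRange]
    rw [if_neg hA, if_neg hA, if_pos hN, if_neg hD, xu2 b (by omega), xu1 (a-1) (by omega),
        zero_bxor, intEo (b+1) (by omega)]
    omega
  · have hA : ¬ PySem.Int.mod a 2 = 1 := by simp [pysem]; omega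
    have hN : ¬ PySem.Int.mod (b - a + 1) 2 = 1 := by simp [pysem]; omega
    have hD : PySem.Int.mod (PySem.Int.floordiv (b - a + 1) 2) 2 = 1 := by simp [pysem]; omega
    dsimp only [xorRange]
    rw [if_neg hA, if_neg hA, if_neg hN, if_pos hD, xu3 b (by omega), xu1 (a-1) (by omega),
        zero_bxor]
  · have hA : ¬ PySem.Int.mod a 2 = 1 := by simp [pysem]; omega
    have hN : PySem.Int.mod (b - a + 1) 2 = 1 := by simp [pysem]; omega
    have hD : PySem.Int.mod (PySem.Int.floordiv (b - a + 1) 2) 2 = 1 := by simp [pysem]; omega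
    dsimp only [xorRange]
    rw [if_neg hA, if_neg hA, if_pos hN, if_pos hD, xu0 b (by omega), xu1 (a-1) (by omega),
        zero_bxor]
  · have hA : ¬ PySem.Int.mod a 2 = 1 := by simp [pysem]; omega
    have hN : ¬ PySem.Int.mod (b - a + 1) 2 = 1 := by simp [pysem]; omega
    have hD : ¬ PySem.Int.mod (PySem.Int.floordiv (b - a + 1) 2) 2 = 1 := by simp [pysem]; omega
    dsimp only [xorRange]
    rw [if_neg hA, if_neg hA, if_neg hN, if_neg hD, xu1 b (by omega), xu1 (a-1) (by omega),
        PySem.Int.bxor_self]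
  -- a % 4 = 3  (a odd, xorUpto (a-1) = a)
  · have hA : PySem.Int.mod a 2 = 1 := by simp [pysem]; omega
    have hN : ¬ PySem.Int.mod (b - (a + 1) + 1) 2 = 1 := by simp [pysem]; omega
    have hD : ¬ PySem.Int.mod (PySem.Int.floordiv (b - (a + 1) + 1) 2) 2 = 1 := by simp [pysem]; omega
    dsimp only [xorRange]
    rw [if_pos hA, if_pos hA, if_neg hN, if_neg hD, xu3 b (by omega), xu2 (a-1) (by omega),
        sub_add_cancel, zero_bxor]
  · have hA : PySem.Int.mod a 2 = 1 := by simp [pysem]; omega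
    have hN : PySem.Int.mod (b - (a + 1) + 1) 2 = 1 := by simp [pysem]; omega
    have hD : ¬ PySem.Int.mod (PySem.Int.floordiv (b - (a + 1) + 1) 2) 2 = 1 := by simp [pysem]; omega
    dsimp only [xorRange]
    rw [if_pos hA, if_pos hA, if_pos hN, if_neg hD, xu0 b (by omega), xu2 (a-1) (by omega),
        sub_add_cancel, PySem.Int.bxor_comm a b]
  · have hA : PySem.Int.mod a 2 = 1 := by simp [pysem]; omega
    have hN : ¬ PySem.Int.mod (b - (a + 1) + 1) 2 = 1 := by simp [pysem]; omega
    have hD : PySem.Int.mod (PySem.Int.floordiv (b - (a + 1) + 1) 2) 2 = 1 := by simp [pysem]; omega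
    dsimp only [xorRange]
    rw [if_pos hA, if_pos hA, if_neg hN, if_pos hD, xu1 b (by omega), xu2 (a-1) (by omega),
        sub_add_cancel, PySem.Int.bxor_comm a 1]
  · have hA : PySem.Int.mod a 2 = 1 := by simp [pysem]; omega
    have hN : PySem.Int.mod (b - (a + 1) + 1) 2 = 1 := by simp [pysem]; omega
    have hD : PySem.Int.mod (PySem.Int.floordiv (b - (a + 1) + 1) 2) 2 = 1 := by simp [pysem]; omega
    dsimp only [xorRange]
    rw [if_pos hA, if_pos hA, if_pos hN, if_pos hD, xu2 b (by omega), xu2 (a-1) (by omega),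
        sub_add_cancel]
    have hp : PySem.Int.bxor a b % 2 = 1 := by rw [bxorParity]; omega
    rw [intEo _ hp]
    have h1 := intFo b a (by omega) (by omega)
    have hc := PySem.Int.bxor_comm a b
    omega

-- a row's direct value splits into its tail's value and a telescoping endpoint term
lemma rowDecomp (s L i : Int) :
    PySem.Int.bxor (xorUpto (s + i * L + L - i - 1)) (xorUpto (s + i * L - 1))
      = PySem.Int.bxor (xorRange (s + (i + 1) * L - 1 - i + 1) (s + (i + 1) * L - 1))
          (PySem.Int.bxor (xorUpto (s + i * L + L - 1)) (xorUpto (s + i * L - 1))) := by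
  rw [xorRange_eq,
      show s + (i + 1) * L - 1 - i + 1 - 1 = s + i * L + L - i - 1 by ring,
      show s + (i + 1) * L - 1 = s + i * L + L - 1 by ring, bxor_cancel4]

-- combined tail lemma: the XOR of rows k..k+n-1 equals the XOR of their tails
-- together with the telescoped endpoint prefixes
lemma tailCombine (s L : Int) (n : Nat) : ∀ k : Int,
    bigXor ((PySem.List.pyRange k (k + (n : Int)) 1).map
        (fun i => PySem.Int.bxor (xorUpto (s + i * L + L - i - 1)) (xorUpto (s + i * L - 1))))
      = PySem.Int.bxor
          (bigXor ((PySem.List.pyRange k (k + (n : Int)) 1).map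
            (fun i => xorRange (s + (i + 1) * L - 1 - i + 1) (s + (i + 1) * L - 1))))
          (PySem.Int.bxor (xorUpto (s + (k + (n : Int)) * L - 1)) (xorUpto (s + k * L - 1))) := by
  induction n with
  | zero =>
      intro k
      rw [show k + ((0 : Nat) : Int) = k by push_cast; ring, PySem.List.pyRange_one_eq_nil le_rfl]
      simp [bigXor, PySem.Int.bxor_self]
  | succ m ih =>
      intro k
      rw [show k + ((m + 1 : Nat) : Int) = (k + 1) + (m : Int) by push_cast; ring,
          PySem.List.pyRange_one_cons (by omega), List.map_cons, List.map_cons,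
          bigXor_cons, bigXor_cons]
      rw [ih (k + 1), rowDecomp s L k,
          show s + (k + 1) * L - 1 = s + k * L + L - 1 by ring]
      exact acStep _ _ _ _ _
-- ===== VERDICT (by name: the statement is the Claim_ definition above) =====
theorem solution_spec : Claim_equal_solution := by
  intro start length _
  unfold Spec_solution solution solution_alt
  rcases (show length ≤ 0 ∨ 0 < length by omega) with h | h
  · rw [if_pos h, PySem.List.pyRange_one_eq_nil h]; rfl
  · rw [if_neg (by omega : ¬ length ≤ 0)]
    have h0 := loopEq start length length.toNat 0 (by omega) start 0
    rw [zero_mul, add_zero] at h0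
    rw [h0]
    have hA : (PySem.List.pyRange 0 length 1).foldl (rowStepClosed start length) 0
        = PySem.Int.bxor 0 (bigXor ((PySem.List.pyRange 0 length 1).map
            (fun i => PySem.Int.bxor (xorUpto (start + i * length + length - i - 1))
              (xorUpto (start + i * length - 1))))) :=
      foldl_bxor_eq _ _ 0
    have hB : (PySem.List.pyRange 1 length 1).foldl (stepB start length)
          (xorRange start (start + length * length - 1))
        = PySem.Int.bxor (xorRange start (start + length * length - 1))
            (bigXor ((PySem.List.pyRange 1 length 1).map
              (fun i => xorRange (start + (i + 1) * length - 1 - i + 1)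
                (start + (i + 1) * length - 1)))) :=
      foldl_bxor_eq _ _ _
    rw [hA, hB, zero_bxor, PySem.List.pyRange_one_cons h, show (0 : Int) + 1 = 1 by norm_num,
        List.map_cons, bigXor_cons]
    have ht := tailCombine start length (length - 1).toNat 1
    rw [show (1 : Int) + (((length - 1).toNat : Nat) : Int) = length from by omega] at ht
    rw [ht, show start + 0 * length + length - 0 - 1 = start + length - 1 by ring,
        show start + 0 * length - 1 = start - 1 by ring,
        show start + 1 * length - 1 = start + length - 1 by ring,
        show xorRange start (start + length * length - 1)
          = PySem.Int.bxor (xorUpto (start + length * length - 1)) (xorUpto (start - 1)) from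
          xorRange_eq start (start + length * length - 1)]
    exact finalAC _ _ _ _
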